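-- pv_equiv track=rewrite | github.com/Yolwoocle/joyeux_anniversaire_arkanyota | notes/Nsi/1.Code/1.3.carlisi_nolan_progApp2Exo.py | compte_max
-- ===== SOURCE A (Python) =====
-- def compte_max(liste: dict) -> tuple[int, int]:  # {{{1
--     if len(liste)==0:
--         return None, 0
--     element_max = liste[0]
--     nb_occurence = 1
--     for i in liste[1:]:
--         if element_max == i:
--             nb_occurence += 1
--         elif element_max < i:
--             nb_occurence = 1
--             element_max = i
--
--     return element_max, nb_occurence
-- ===== SOURCE B (Python) =====
-- def compte_max(liste):
--     if len(liste) == 0: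
--         return None, 0
--     m = max(liste)
--     return m, liste.count(m)
-- ===== Notes on version B (the rewrite author's own statement) =====
-- stated objective: simpler
-- what changed: Replaces the fused single-pass max-tracking loop (which resets the counter on a new maximum) by a find-then-count decomposition: m = max(liste), then liste.count(m).
-- outside the precondition, e.g. on compte_max([]): A returns (None, 0), B returns (None, 0)
import Mathlib
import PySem

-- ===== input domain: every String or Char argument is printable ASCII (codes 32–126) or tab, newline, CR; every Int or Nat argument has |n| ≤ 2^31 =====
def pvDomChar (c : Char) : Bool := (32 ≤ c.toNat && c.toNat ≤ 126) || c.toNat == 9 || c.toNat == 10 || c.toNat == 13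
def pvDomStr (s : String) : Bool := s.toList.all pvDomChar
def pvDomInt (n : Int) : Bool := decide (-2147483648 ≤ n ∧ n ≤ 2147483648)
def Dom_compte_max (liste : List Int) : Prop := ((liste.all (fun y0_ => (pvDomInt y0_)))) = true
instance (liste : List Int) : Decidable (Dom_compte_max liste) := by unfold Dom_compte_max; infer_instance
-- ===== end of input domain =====

-- B replaces A's fused single-pass max-tracking loop by a find-then-count decomposition (max, then count); same results on non-empty lists.


-- ===== PORT A =====
def compte_max (liste : List Int) : Int × Int :=
  match liste with
  | [] => (0, 0)  -- unreachable under Pre_ (Python returns (None, 0) here, outside Int × Int)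
  | h :: t =>
    t.foldl (fun s i =>
      if s.1 == i then (s.1, s.2 + 1)
      else if s.1 < i then (i, 1)
      else s) (h, 1)

-- ===== PORT B =====
def compte_max_alt (liste : List Int) : Int × Int :=
  match PySem.List.max? liste (fun x => x) with
  | none => (0, 0)  -- unreachable under Pre_ (Source B returns (None, 0) here, outside Int × Int)
  | some m => (m, (PySem.List.count liste m : Int))

-- ===== PRECONDITION & SPEC =====
-- Pre_ excludes only the empty list, where both Pythons return (None, 0), which is not a value of Int × Int.
def Pre_compte_max (liste : List Int) : Prop := liste ≠ []
instance (liste : List Int) : Decidable (Pre_compte_max liste) := by unfold Pre_compte_max; infer_instance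
def pvWitness_compte_max : List Int := [3, 1, 3]
def Spec_compte_max (liste : List Int) (out : Int × Int) : Prop := out = compte_max_alt liste
instance (liste : List Int) (out : Int × Int) : Decidable (Spec_compte_max liste out) := by unfold Spec_compte_max; infer_instance

-- ===== CLAIM (what is proved, stated in full; the proofs are below) =====
def Claim_equal_compte_max : Prop := ∀ (liste : List Int), Dom_compte_max liste → Pre_compte_max liste → Spec_compte_max liste (compte_max liste)

-- ===== LEMMAS AND PROOFS =====

-- Invariant of A's fused loop: the state after folding t from (m, c) is the running max M,
-- paired with the count of M in t plus the carried c when M is still m.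
theorem compte_max_fold_inv (t : List Int) : ∀ (m c : Int),
    t.foldl (fun s i =>
      if s.1 == i then (s.1, s.2 + 1)
      else if s.1 < i then (i, 1)
      else s) (m, c)
    = (t.foldl max m,
       (if t.foldl max m = m then c else 0) + (t.count (t.foldl max m) : Int)) := by
  induction t with
  | nil => intro m c; simp
  | cons i t ih =>
    intro m c
    by_cases h1 : m = i
    · subst h1
      simp only [List.foldl_cons, BEq.rfl, if_pos, max_self, ih]
      rw [List.count_cons]
      by_cases h2 : t.foldl max m = m <;> simp [h2] <;> omega
    · by_cases h2 : m < i
      · have hne : (m == i) = false := by simp [h1]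
        simp only [List.foldl_cons, hne, Bool.false_eq_true, if_false, if_pos h2, ih]
        have hmax : max m i = i := max_eq_right h2.le
        have hle : i ≤ t.foldl max i := (PySem.List.le_foldl_max t i).1
        have hMne : t.foldl max i ≠ m := by omega
        simp only [hmax, List.count_cons]
        by_cases h3 : t.foldl max i = i <;> simp [h3, hMne] <;> omega
      · have hgt : i < m := by omega
        have hne : (m == i) = false := by simp [h1]
        simp only [List.foldl_cons, hne, Bool.false_eq_true, if_false, if_neg h2, ih]
        have hmax : max m i = m := max_eq_left hgt.le
        have hle : m ≤ t.foldl max m := (PySem.List.le_foldl_max t m).1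
        have hMne : t.foldl max m ≠ i := by omega
        simp only [hmax, List.count_cons]
        simp [Ne.symm hMne]

-- ===== VERDICT (by name: the statement is the Claim_ definition above) =====
theorem compte_max_spec : Claim_equal_compte_max := by
  intro liste _ hpre
  unfold Spec_compte_max compte_max compte_max_alt
  match liste with
  | [] => exact absurd rfl hpre
  | h :: t =>
    rw [PySem.List.max?_id_cons]
    simp only [compte_max_fold_inv]
    rw [PySem.List.count_eq]
    by_cases h3 : t.foldl max h = h
    · simp [h3]; omega
    · have hne : (h == t.foldl max h) = false := by simp; omega
      simp [h3, List.count_cons, hne]
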